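-- pv_equiv track=rewrite | github.com/zijing2/BIA660 | HW3/zhuang21.py | count_token
-- ===== SOURCE A (Python) =====
-- from string import punctuation
--
-- def count_token(text):
--     list1 = text.split()
--     token_count = {}
--     s = ""
--     for idx,x in enumerate(list1):
--         s = x.strip().lower().strip(punctuation)
--         if(s != ''):
--             if(s in token_count):
--                 token_count[s] += 1
--             else:
--                 token_count[s] = 1
--     return token_count
-- ===== SOURCE B (Python) =====
-- from string import punctuation
--
-- def count_token(text):
--     tokens = [t for t in (w.strip().lower().strip(punctuation) for w in text.split()) if t != '']
--
--     def go(ts):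
--         if not ts:
--             return {}
--         t = ts[0]
--         rest = [u for u in ts[1:] if u != t]
--         d = {t: len(ts) - len(rest)}
--         d.update(go(rest))
--         return d
--
--     return go(tokens)
-- ===== Notes on version B (the rewrite author's own statement) =====
-- stated objective: alternative
-- what changed: B replaces A's single stateful loop that increments a counting dict per word by a recursive partition: it materializes the normalized-token list, then recursively takes the first token, removes all its occurrences from the tail (obtaining its count as a length difference), and recurses on the remainder — no counting container at all.
import Mathlib
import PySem

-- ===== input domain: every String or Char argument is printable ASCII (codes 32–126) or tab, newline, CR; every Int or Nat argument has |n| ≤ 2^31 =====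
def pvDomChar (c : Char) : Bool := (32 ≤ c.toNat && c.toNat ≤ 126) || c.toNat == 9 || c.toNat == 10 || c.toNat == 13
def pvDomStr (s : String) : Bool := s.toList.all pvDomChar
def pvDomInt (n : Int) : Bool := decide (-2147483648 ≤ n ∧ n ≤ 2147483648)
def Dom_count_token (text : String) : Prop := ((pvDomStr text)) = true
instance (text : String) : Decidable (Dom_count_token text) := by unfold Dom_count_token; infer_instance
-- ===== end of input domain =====

-- B builds the normalized-token list and then counts it by recursive partition (take the first token,
-- remove all of its occurrences, recurse) instead of A's stateful per-word dict-update loop; alternative decomposition.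

-- string.punctuation
def pvPunct : String := "!\"#$%&'()*+,-./:;<=>?@[\\]^_`{|}~"

-- s = x.strip().lower().strip(punctuation)
def pvNorm (x : String) : String :=
  PySem.Str.stripChars (PySem.Str.lower (PySem.Str.strip x)) pvPunct

-- ===== PORT A =====
def count_token (text : String) : List (String × Int) :=
  let list1 := PySem.Str.split₀ text
  let st := (PySem.List.enumerate list1).foldl
    (fun (st : PySem.Dict String Int × String) (p : Int × String) =>
      let s := pvNorm p.2
      if s ≠ "" then
        if st.1.contains s then (st.1.insert s (st.1.getD s 0 + 1), s)
        else (st.1.insert s 1, s)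
      else (st.1, s))
    (PySem.Dict.empty, "")
  st.1.items

-- ===== PORT B =====
-- def go(ts): if not ts: return {} ; t = ts[0]; rest = [u for u in ts[1:] if u != t];
--             d = {t: len(ts) - len(rest)}; d.update(go(rest)); return d
-- (t never occurs in go(rest)'s keys, so d.update appends go(rest)'s items after (t, count))
def pvGo (ts : List String) : List (String × Int) :=
  match ts with
  | [] => []
  | t :: tl =>
    let rest := tl.filter (fun u => u != t)
    (t, (ts.length : Int) - (rest.length : Int)) :: pvGo rest
termination_by ts.length
decreasing_by simpa using Nat.lt_succ_of_le (List.length_filter_le _ _)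

def count_token_alt (text : String) : List (String × Int) :=
  let tokens := ((PySem.Str.split₀ text).map pvNorm).filter (fun t => t != "")
  pvGo tokens

-- ===== PRECONDITION & SPEC =====
def Spec_count_token (text : String) (out : List (String × Int)) : Prop := out = count_token_alt text
instance (text : String) (out : List (String × Int)) : Decidable (Spec_count_token text out) := by unfold Spec_count_token; infer_instance

-- ===== CLAIM =====
def Claim_equal_count_token : Prop := ∀ (text : String), Dom_count_token text → Spec_count_token text (count_token text)

-- ===== LEMMAS AND PROOFS =====

-- A's loop body, in dict-only form
def pvStepA (d : PySem.Dict String Int) (x : String) : PySem.Dict String Int :=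
  let s := pvNorm x
  if s ≠ "" then d.insert s (d.getD s 0 + 1) else d

-- the enumerate/pair-state fold of port A computes the dict-only fold (idx and the s variable are dead state)
theorem pvFoldA_enum (xs : List String) (k : Int) (d : PySem.Dict String Int) (s0 : String) :
    ((PySem.List.enumerate xs k).foldl
      (fun (st : PySem.Dict String Int × String) (p : Int × String) =>
        let s := pvNorm p.2
        if s ≠ "" then
          if st.1.contains s then (st.1.insert s (st.1.getD s 0 + 1), s)
          else (st.1.insert s 1, s)
        else (st.1, s))
      (d, s0)).1 = xs.foldl pvStepA d := by
  induction xs generalizing k d s0 with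
  | nil => simp only [PySem.List.enumerate_nil, List.foldl_nil]
  | cons x xs ih =>
    rw [PySem.List.enumerate_cons]
    simp only [List.foldl_cons, pvStepA]
    split_ifs with h1 h2
    · exact ih _ _ _
    · have h0 : d.getD (pvNorm x) 0 = 0 :=
        PySem.Dict.getD_of_not_contains d 0 (by simpa using h2)
      rw [h0, zero_add]
      exact ih _ _ _
    · exact ih _ _ _

-- A's conditional loop is the plain counting loop over the filtered normalized tokens
theorem pvFoldA_filter (xs : List String) (d : PySem.Dict String Int) :
    xs.foldl pvStepA d
      = ((xs.map pvNorm).filter (fun t => t != "")).foldl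
          (fun d s => d.insert s (d.getD s 0 + 1)) d := by
  induction xs generalizing d with
  | nil => simp
  | cons x xs ih =>
    by_cases h : pvNorm x = ""
    · simp [pvStepA, h, ih]
    · simp [pvStepA, h, ih]

-- elements already in the accumulator may be filtered out of the folded list
theorem pvFoldl_add_filter (ts : List String) (s : List String) (x : String) (hx : x ∈ s) :
    ts.foldl PySem.Set.add s = (ts.filter (fun u => u != x)).foldl PySem.Set.add s := by
  induction ts generalizing s with
  | nil => rfl
  | cons u tl ih =>
    by_cases hu : u = x
    · subst hu
      have : PySem.Set.add s u = s := by simp [PySem.Set.add, hx]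
      simp [this, ih s hx]
    · have : x ∈ PySem.Set.add s u := by
        simp [PySem.Set.add]; split <;> simp [hx]
      simp [hu, List.foldl_cons, ih _ this]

-- pulling a fresh head element out of the accumulator
theorem pvFoldl_add_cons (ts : List String) (s : List String) (x : String) (hx : x ∉ ts) :
    ts.foldl PySem.Set.add (x :: s) = x :: ts.foldl PySem.Set.add s := by
  induction ts generalizing s with
  | nil => rfl
  | cons u tl ih =>
    have hux : u ≠ x := fun h => hx (h ▸ List.mem_cons_self)
    have hx' : x ∉ tl := fun h => hx (List.mem_cons_of_mem _ h)
    have hxu : (x == u) = false := by simpa using (Ne.symm hux)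
    have hc : PySem.Set.contains (x :: s) u = PySem.Set.contains s u := by
      simp [PySem.Set.contains]
      exact fun h => absurd h hux
    have hstep : PySem.Set.add (x :: s) u = x :: PySem.Set.add s u := by
      simp only [PySem.Set.add, hc]
      split <;> simp
    rw [List.foldl_cons, List.foldl_cons, hstep, ih _ hx']

-- recursive characterisation of ordered dedup
theorem pvDedup_cons (x : String) (ts : List String) :
    PySem.List.dedup (x :: ts) = x :: PySem.List.dedup (ts.filter (fun u => u != x)) := by
  have h1 : PySem.List.dedup (x :: ts) = ts.foldl PySem.Set.add [x] := by
    simp [PySem.List.dedup_eq_ofList, PySem.Set.ofList_eq_foldl, PySem.Set.add]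
  have h2 : PySem.List.dedup (ts.filter (fun u => u != x))
      = (ts.filter (fun u => u != x)).foldl PySem.Set.add [] := by
    simp [PySem.List.dedup_eq_ofList, PySem.Set.ofList_eq_foldl]
  rw [h1, h2, pvFoldl_add_filter ts [x] x (by simp)]
  have : ([x] : List String) = x :: [] := rfl
  rw [this, pvFoldl_add_cons]
  simp

-- B's recursion computes exactly Counter's items: first occurrences paired with their counts
theorem pvGo_eq (ts : List String) :
    pvGo ts = (PySem.List.dedup ts).map (fun t => (t, (ts.count t : Int))) := by
  induction hn : ts.length using Nat.strong_induction_on generalizing ts with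
  | _ n ih =>
    match ts with
    | [] => simp [pvGo]
    | t :: tl =>
      rw [pvGo, pvDedup_cons]
      have hrest : (tl.filter (fun u => u != t)).length < n := by
        subst hn; simpa using Nat.lt_succ_of_le (List.length_filter_le _ _)
      rw [ih _ hrest _ rfl]
      simp only [List.map_cons]
      congr 1
      · -- head: the length difference is the count of t
        subst hn
        have hlen : tl.length = tl.countP (fun u => u == t) + tl.countP (fun u => !(u == t)) := by
          simpa using List.length_eq_countP_add_countP (fun u => u == t) (l := tl)
        have hfl : (tl.filter (fun u => u != t)).length = tl.countP (fun u => !(u == t)) := by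
          rw [List.countP_eq_length_filter]; rfl
        have hcnt : List.count t (t :: tl) = tl.countP (fun u => u == t) + 1 := by
          rw [List.count_cons_self]; rfl
        simp only [Prod.mk.injEq, true_and, hcnt, hfl, List.length_cons]
        omega
      · -- tail: counts in the filtered list agree with counts in t :: tl
        apply List.map_congr_left
        intro u hu
        have hu' : u ∈ tl.filter (fun v => v != t) := by
          simpa [PySem.List.mem_dedup] using hu
        have hne : u ≠ t := by
          have := List.of_mem_filter hu'
          simpa using this
        have hcf : (tl.filter (fun v => v != t)).count u = tl.count u := by
          rw [List.count_filter (by simpa using hne)]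
        simp [hcf, hne.symm]

-- ===== VERDICT =====
theorem count_token_spec : Claim_equal_count_token := by
  intro text _
  show count_token text = count_token_alt text
  simp only [count_token, count_token_alt]
  rw [pvFoldA_enum, pvFoldA_filter,
      PySem.Dict.foldl_insert_getD_add_one_eq_counter,
      PySem.Dict.items_counter, pvGo_eq]
  simp only [PySem.List.dedup_eq_ofList]
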